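-- pv_equiv track=rewrite | github.com/crazymerlyn/euler | 491.py | div11
-- ===== SOURCE A (Python) =====
-- from itertools import combinations
-- from collections import Counter
-- from math import factorial
--
-- def div11(ns):
--     s = sum(ns)
--     res = 0
--     seen = set()
--     for comb in combinations(ns, len(ns) // 2):
--         comb = tuple(sorted(comb))
--         if comb not in seen:
--             seen.add(comb)
--         else:
--             continue
--         if (s - sum(comb) * 2) % 11 == 0:
--             cur = factorial(len(ns) // 2)
--             for _, v in Counter(comb).items():
--                 cur //= factorial(v)
--             cur2 = factorial(len(ns) - len(ns) // 2)
--             for _, v in (Counter(ns) - Counter(comb)).items():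
--                 cur2 //= factorial(v)
--             res += cur * cur2
--     return res
-- ===== SOURCE B (Python) =====
-- from math import factorial
-- from collections import Counter
--
--
-- def _count(gs, need, rem, p1, p2, fk, fnk):
--     # gs: remaining (value, count) groups; need: slots left in the first half;
--     # rem: s - 2*(sum of chosen so far); p1/p2: products of j! and (count-j)! so far.
--     if not gs:
--         if need == 0 and rem % 11 == 0:
--             return (fk // p1) * (fnk // p2)
--         return 0
--     v, c = gs[0]
--     total = 0
--     for j in range(min(c, need) + 1):
--         total += _count(gs[1:], need - j, rem - 2 * j * v,
--                         p1 * factorial(j), p2 * factorial(c - j), fk, fnk)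
--     return total
--
--
-- def div11(ns):
--     n = len(ns)
--     k = n // 2
--     groups = sorted(Counter(ns).items())
--     return _count(groups, k, sum(ns), 1, 1, factorial(k), factorial(n - k))
-- ===== Notes on version B (the rewrite author's own statement) =====
-- stated objective: alternative
-- what changed: B replaces A's enumeration of all C(n,k) position-combinations (sorting each and deduplicating through a seen-set) by a recursion over the distinct-value groups of Counter(ns) that visits each distinct size-k sub-multiset exactly once, threading the residue and the factorial products along the path.
import Mathlib
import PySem

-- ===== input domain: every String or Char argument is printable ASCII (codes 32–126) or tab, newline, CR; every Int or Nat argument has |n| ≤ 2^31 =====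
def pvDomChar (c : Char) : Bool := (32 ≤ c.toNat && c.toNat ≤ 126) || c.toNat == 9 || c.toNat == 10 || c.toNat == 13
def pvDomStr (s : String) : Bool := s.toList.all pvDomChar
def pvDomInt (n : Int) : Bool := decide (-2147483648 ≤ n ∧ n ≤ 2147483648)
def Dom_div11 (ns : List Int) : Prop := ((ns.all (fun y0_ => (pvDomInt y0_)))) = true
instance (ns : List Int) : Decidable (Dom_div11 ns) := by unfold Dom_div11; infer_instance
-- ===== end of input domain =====

-- B replaces A's enumeration of all C(n,k) position-combinations (sorted + seen-set dedup) by a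
-- recursion over the distinct-value groups of Counter(ns) that visits each distinct sub-multiset once.

-- ===== PORT A =====

-- math.factorial; exact for n ≥ 0 (every argument A passes is a length or a count, hence ≥ 0)
def pvFact (n : Int) : Int := (Nat.factorial n.toNat : Int)

-- itertools.combinations(xs, k): subsequences of length k in lexicographic position order
def pvCombos : List Int → Nat → List (List Int)
  | _, 0 => [[]]
  | [], _ + 1 => []
  | x :: xs, k + 1 => (pvCombos xs k).map (fun t => x :: t) ++ pvCombos xs (k + 1)

-- Counter.__sub__ (CPython): keep positive differences, in self's key order. (CPython's second
-- loop over `other` only fires for non-positive counts in `other`; Counter(comb) has none.)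
def pvCounterSub (a b : PySem.Dict Int Int) : PySem.Dict Int Int :=
  a.items.foldl
    (fun r p =>
      let newcount := p.2 - b.getD p.1 0
      if 0 < newcount then r.insert p.1 newcount else r)
    PySem.Dict.empty

-- ((ns.length / 2 : Nat) : Int) is Python's len(ns) // 2 (floor division of nonnegative ints)
def div11 (ns : List Int) : Int :=
  let s := ns.sum
  ((pvCombos ns (ns.length / 2)).foldl
    (fun (st : PySem.Set (List Int) × Int) (comb0 : List Int) =>
      let comb := PySem.List.sorted comb0 (fun x => x)
      if PySem.Set.contains st.1 comb then st
      else
        let seen := PySem.Set.add st.1 comb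
        if PySem.Int.mod (s - comb.sum * 2) 11 = 0 then
          let cur := ((PySem.Dict.counter comb).items).foldl
            (fun c kv => PySem.Int.floordiv c (pvFact kv.2))
            (pvFact ((ns.length / 2 : Nat) : Int))
          let cur2 := ((pvCounterSub (PySem.Dict.counter ns) (PySem.Dict.counter comb)).items).foldl
            (fun c kv => PySem.Int.floordiv c (pvFact kv.2))
            (pvFact ((ns.length - ns.length / 2 : Nat) : Int))
          (seen, st.2 + cur * cur2)
        else (seen, st.2))
    (PySem.Set.empty, 0)).2

-- ===== PORT B =====

-- _count of Source B: recursion over the remaining (value, count) groups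
def pvCount : List (Int × Int) → Int → Int → Int → Int → Int → Int → Int
  | [], need, rem, p1, p2, fk, fnk =>
      if need = 0 ∧ PySem.Int.mod rem 11 = 0 then
        PySem.Int.floordiv fk p1 * PySem.Int.floordiv fnk p2
      else 0
  | (v, c) :: gs, need, rem, p1, p2, fk, fnk =>
      (PySem.List.pyRange 0 (min c need + 1)).foldl
        (fun total j =>
          total + pvCount gs (need - j) (rem - 2 * j * v)
            (p1 * pvFact j) (p2 * pvFact (c - j)) fk fnk)
        0

-- sorted(Counter(ns).items()): Python sorts the (value, count) tuples lexicographically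
def div11_alt (ns : List Int) : Int :=
  let n := ns.length
  let k : Nat := n / 2
  let groups := PySem.List.sorted2 (PySem.Dict.counter ns).items Prod.fst Prod.snd
  pvCount groups (k : Int) ns.sum 1 1 (pvFact (k : Int)) (pvFact ((n - k : Nat) : Int))

-- ===== PRECONDITION & SPEC =====
def Spec_div11 (ns : List Int) (out : Int) : Prop := out = div11_alt ns
instance (ns : List Int) (out : Int) : Decidable (Spec_div11 ns out) := by unfold Spec_div11; infer_instance

-- ===== CLAIM (what is proved, stated in full; the proofs are below) =====
def Claim_equal_div11 : Prop := ∀ (ns : List Int), Dom_div11 ns → Spec_div11 ns (div11 ns)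

-- ===== LEMMAS AND PROOFS =====

-- abbreviations used only by the proofs
def sortc (c : List Int) : List Int := PySem.List.sorted c (fun x => x)

def curA (ns c : List Int) : Int :=
  ((PySem.Dict.counter c).items).foldl
    (fun cur kv => PySem.Int.floordiv cur (pvFact kv.2)) (pvFact ((ns.length / 2 : Nat) : Int))

def cur2A (ns c : List Int) : Int :=
  ((pvCounterSub (PySem.Dict.counter ns) (PySem.Dict.counter c)).items).foldl
    (fun cur kv => PySem.Int.floordiv cur (pvFact kv.2))
    (pvFact ((ns.length - ns.length / 2 : Nat) : Int))

def gA (ns c : List Int) : Int :=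
  if PySem.Int.mod (ns.sum - c.sum * 2) 11 = 0 then curA ns c * cur2A ns c else 0

def fprod (c : List Int) : Int :=
  ((PySem.List.dedup c).map (fun x => pvFact (c.count x))).prod

def fprodR (gs : List (Int × Int)) (c : List Int) : Int :=
  (gs.map (fun p => pvFact (p.2 - c.count p.1))).prod

-- the distinct sub-multisets reachable from the groups, as lists in group order
def Mlist : List (Int × Int) → Int → List (List Int)
  | [], need => if need = 0 then [[]] else []
  | (v, c) :: gs, need =>
      (PySem.List.pyRange 0 (min c need + 1)).flatMap
        (fun j => (Mlist gs (need - j)).map (fun t => List.replicate j.toNat v ++ t))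

def hB (s fk fnk : Int) (gs : List (Int × Int)) (c : List Int) : Int :=
  if PySem.Int.mod (s - 2 * c.sum) 11 = 0 then
    PySem.Int.floordiv fk (fprod c) * PySem.Int.floordiv fnk (fprodR gs c)
  else 0

lemma pvFact_pos (n : Int) : 0 < pvFact n := by
  simpa [pvFact] using Nat.factorial_pos n.toNat

lemma sum_flatMap {α β : Type} (l : List α) (f : α → List β) [AddCommMonoid β] :
    (l.flatMap f).sum = (l.map (fun a => (f a).sum)).sum := by
  induction l with
  | nil => simp
  | cons x xs ih => simp [List.flatMap_cons, List.sum_append, ih]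

-- A-side: the seen-set fold is the sum of gA over the distinct sorted combinations
lemma foldA (ns : List Int) (M : List (List Int)) :
    ∀ (seen : PySem.Set (List Int)) (res : Int),
      (M.foldl
        (fun (st : PySem.Set (List Int) × Int) c =>
          if PySem.Set.contains st.1 c then st
          else (PySem.Set.add st.1 c, st.2 + gA ns c))
        (seen, res)).2
      = res + ∑ c ∈ (M.filter (fun c => ¬ PySem.Set.contains seen c)).toFinset, gA ns c := by
  induction M with
  | nil => simp
  | cons c M' ih =>
    intro seen res
    by_cases h : PySem.Set.contains seen c = true
    · have hf : List.filter (fun x => decide ¬PySem.Set.contains seen x = true) (c :: M')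
          = List.filter (fun x => decide ¬PySem.Set.contains seen x = true) M' := by
        have hm := (PySem.Set.contains_iff seen c).1 h
        rw [List.filter_cons]; simp [hm]
      simp only [List.foldl_cons, h, if_true]
      rw [ih seen res, hf]
    · simp only [List.foldl_cons]
      rw [if_neg (by simpa using h)]
      rw [ih (PySem.Set.add seen c) (res + gA ns c)]
      have hset : (M'.filter (fun x => ¬ PySem.Set.contains (PySem.Set.add seen c) x)).toFinset
          = ((M'.filter (fun x => ¬ PySem.Set.contains seen x)).toFinset).erase c := by
        ext x
        simp only [List.mem_toFinset, List.mem_filter, Finset.mem_erase, decide_eq_true_eq]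
        constructor
        · rintro ⟨hx, hnc⟩
          have hx' : ¬ (x ∈ PySem.Set.add seen c) := fun hm => hnc ((PySem.Set.contains_iff _ _).2 hm)
          rw [PySem.Set.mem_add] at hx'
          push Not at hx'
          exact ⟨hx'.2, hx, fun hc => hx'.1 ((PySem.Set.contains_iff _ _).1 hc)⟩
        · rintro ⟨hne, hx, hnc⟩
          refine ⟨hx, fun hc => ?_⟩
          have := (PySem.Set.contains_iff _ _).1 hc
          rw [PySem.Set.mem_add] at this
          rcases this with hm | he
          · exact hnc ((PySem.Set.contains_iff _ _).2 hm)
          · exact hne he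
      rw [hset]
      have hf : List.filter (fun x => decide ¬PySem.Set.contains seen x = true) (c :: M')
          = c :: List.filter (fun x => decide ¬PySem.Set.contains seen x = true) M' := by
        have hm : c ∉ seen := fun m => h ((PySem.Set.contains_iff seen c).2 m)
        rw [List.filter_cons]; simp [hm]
      rw [hf]
      set S := (M'.filter (fun x => ¬ PySem.Set.contains seen x)).toFinset with hS
      have hins : insert c S = insert c (S.erase c) := by
        ext y; by_cases hy : y = c <;> simp [hy]
      rw [List.toFinset_cons, hins, Finset.sum_insert (Finset.notMem_erase _ _)]
      ring

lemma div11_eq_sum (ns : List Int) :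
    div11 ns = ∑ c ∈ ((pvCombos ns (ns.length / 2)).map sortc).toFinset, gA ns c := by
  have h0 : div11 ns = ((pvCombos ns (ns.length / 2)).foldl
      (fun (st : PySem.Set (List Int) × Int) (comb0 : List Int) =>
        let comb := PySem.List.sorted comb0 (fun x => x)
        if PySem.Set.contains st.1 comb then st
        else
          let seen := PySem.Set.add st.1 comb
          if PySem.Int.mod (ns.sum - comb.sum * 2) 11 = 0 then
            let cur := ((PySem.Dict.counter comb).items).foldl
              (fun c kv => PySem.Int.floordiv c (pvFact kv.2))
              (pvFact ((ns.length / 2 : Nat) : Int))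
            let cur2 := ((pvCounterSub (PySem.Dict.counter ns) (PySem.Dict.counter comb)).items).foldl
              (fun c kv => PySem.Int.floordiv c (pvFact kv.2))
              (pvFact ((ns.length - ns.length / 2 : Nat) : Int))
            (seen, st.2 + cur * cur2)
          else (seen, st.2))
      (PySem.Set.empty, 0)).2 := rfl
  rw [h0]
  have hb : (fun (st : PySem.Set (List Int) × Int) (comb0 : List Int) =>
      let comb := PySem.List.sorted comb0 (fun x => x)
      if PySem.Set.contains st.1 comb then st
      else
        let seen := PySem.Set.add st.1 comb
        if PySem.Int.mod (ns.sum - comb.sum * 2) 11 = 0 then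
          let cur := ((PySem.Dict.counter comb).items).foldl
            (fun c kv => PySem.Int.floordiv c (pvFact kv.2))
            (pvFact ((ns.length / 2 : Nat) : Int))
          let cur2 := ((pvCounterSub (PySem.Dict.counter ns) (PySem.Dict.counter comb)).items).foldl
            (fun c kv => PySem.Int.floordiv c (pvFact kv.2))
            (pvFact ((ns.length - ns.length / 2 : Nat) : Int))
          (seen, st.2 + cur * cur2)
        else (seen, st.2))
      = (fun st comb0 =>
          (fun (st : PySem.Set (List Int) × Int) c =>
            if PySem.Set.contains st.1 c then st
            else (PySem.Set.add st.1 c, st.2 + gA ns c)) st (sortc comb0)) := by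
    funext st c0
    simp only [sortc, gA, curA, cur2A]
    by_cases h1 : (PySem.List.sorted c0 (fun x => x)) ∈ st.1
    · simp [h1]
    · by_cases h2 : (11 : Int) ∣ (ns.sum - (PySem.List.sorted c0 (fun x => x)).sum * 2) <;>
        simp [h1, h2]
  rw [hb]
  rw [← List.foldl_map (f := sortc)
      (g := fun (st : PySem.Set (List Int) × Int) c =>
        if PySem.Set.contains st.1 c then st
        else (PySem.Set.add st.1 c, st.2 + gA ns c))
      (l := pvCombos ns (ns.length / 2)) (init := ((PySem.Set.empty : PySem.Set (List Int)), (0 : Int)))]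
  rw [foldA]
  have : ∀ c ∈ (pvCombos ns (ns.length / 2)).map sortc,
      (decide ¬PySem.Set.contains (PySem.Set.empty : PySem.Set (List Int)) c = true) = true := by
    intro c _
    simp [PySem.Set.contains_iff, PySem.Set.empty]
  rw [List.filter_eq_self.2 this]
  ring

lemma mem_combos (xs : List Int) : ∀ (k : Nat) (t : List Int),
    t ∈ pvCombos xs k ↔ t.Sublist xs ∧ t.length = k := by
  induction xs with
  | nil =>
    intro k t
    cases k with
    | zero =>
      constructor
      · intro h
        have : t = [] := by simpa [pvCombos] using h
        subst this; exact ⟨List.nil_sublist _, rfl⟩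
      · rintro ⟨_, h⟩
        have : t = [] := List.length_eq_zero_iff.1 h
        simp [pvCombos, this]
    | succ k =>
      simp only [pvCombos, List.not_mem_nil, false_iff]
      rintro ⟨hs, hl⟩
      have : t = [] := List.sublist_nil.1 hs
      subst this; simp at hl
  | cons x xs ih =>
    intro k t
    cases k with
    | zero =>
      constructor
      · intro h
        have : t = [] := by simpa [pvCombos] using h
        subst this; exact ⟨List.nil_sublist _, rfl⟩
      · rintro ⟨_, h⟩
        have : t = [] := List.length_eq_zero_iff.1 h
        simp [pvCombos, this]
    | succ k =>
      simp only [pvCombos, List.mem_append, List.mem_map]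
      constructor
      · rintro (⟨u, hu, rfl⟩ | h)
        · have := (ih k u).1 hu
          exact ⟨List.Sublist.cons₂ x this.1, by simp [this.2]⟩
        · have := (ih (k + 1) t).1 h
          exact ⟨this.1.cons x, this.2⟩
      · rintro ⟨hs, hl⟩
        rcases List.sublist_cons_iff.1 hs with h | ⟨r, rfl, hr⟩
        · exact Or.inr ((ih (k + 1) t).2 ⟨h, hl⟩)
        · exact Or.inl ⟨r, (ih k r).2 ⟨hr, by simpa using hl⟩, rfl⟩

lemma mem_A_set (ns c : List Int) (k : Nat) :
    c ∈ (pvCombos ns k).map sortc ↔ c.Subperm ns ∧ c.length = k ∧ sortc c = c := by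
  constructor
  · intro hm
    rcases List.mem_map.1 hm with ⟨t, ht, rfl⟩
    obtain ⟨hs, hl⟩ := (mem_combos ns k t).1 ht
    have hperm : (sortc t).Perm t := PySem.List.sorted_perm t (fun x => x) false
    refine ⟨hperm.subperm.trans hs.subperm, by simpa [hperm.length_eq] using hl, ?_⟩
    simpa [sortc] using PySem.List.sorted_sorted t (fun x => x)
  · rintro ⟨hsub, hl, hsort⟩
    obtain ⟨t, htc, hts⟩ := hsub
    refine List.mem_map.2 ⟨t, (mem_combos ns k t).2 ⟨hts, by simpa [htc.length_eq] using hl⟩, ?_⟩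
    have he : sortc t = sortc c := PySem.List.sorted_eq_sorted_of_perm t c (fun x => x) (fun _ _ h => h) htc
    rw [he, hsort]

-- B-side: pvCount is the sum of the leaf terms over Mlist
lemma mem_Mlist_keys : ∀ (gs : List (Int × Int)) (need : Int) (c : List Int),
    c ∈ Mlist gs need → ∀ x ∈ c, x ∈ gs.map Prod.fst := by
  intro gs
  induction gs with
  | nil =>
    intro need c hc x hx
    by_cases hn : need = 0 <;> simp [Mlist, hn] at hc
    subst hc; simp at hx
  | cons p gs ih =>
    obtain ⟨v, cnt⟩ := p
    intro need c hc x hx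
    simp only [Mlist, List.mem_flatMap, List.mem_map] at hc
    obtain ⟨j, _, t, ht, rfl⟩ := hc
    rcases List.mem_append.1 hx with hx | hx
    · rw [List.eq_of_mem_replicate hx]; simp
    · simp only [List.map_cons]
      exact List.mem_cons_of_mem _ (ih (need - j) t ht x hx)

lemma fprod_nil : fprod [] = 1 := rfl

lemma fprodR_nil (c : List Int) : fprodR [] c = 1 := rfl

lemma pvFact_natCast_toNat (j : Int) (h : 0 ≤ j) : pvFact ((j.toNat : Nat) : Int) = pvFact j := by
  simp [pvFact, max_eq_left h]

lemma fprod_replicate_append (v : Int) (n : Nat) (t : List Int) (hv : v ∉ t) :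
    fprod (List.replicate n v ++ t) = pvFact (n : Int) * fprod t := by
  cases n with
  | zero => simp [pvFact, Nat.factorial]
  | succ n =>
    have hperm : (PySem.List.dedup (List.replicate (n + 1) v ++ t)).Perm (v :: PySem.List.dedup t) := by
      rw [List.perm_ext_iff_of_nodup (PySem.List.nodup_dedup _)
        (by simp [List.nodup_cons, PySem.List.nodup_dedup, PySem.List.mem_dedup, hv])]
      intro a
      simp [PySem.List.mem_dedup, List.mem_replicate]
    unfold fprod
    rw [List.Perm.prod_eq (hperm.map _)]
    simp only [List.map_cons, List.prod_cons]
    congr 1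
    · have h1 : List.count v (List.replicate (n + 1) v ++ t) = n + 1 := by
        rw [List.count_append, List.count_replicate, List.count_eq_zero_of_not_mem hv]
        simp
      rw [h1]
    · apply congrArg List.prod
      apply List.map_congr_left
      intro x hx
      have hxt : x ∈ t := (PySem.List.mem_dedup t x).1 hx
      have hxv : v ≠ x := fun h => hv (h ▸ hxt)
      rw [List.count_append, List.count_replicate, if_neg (by simpa using hxv)]
      simp

lemma countB : ∀ (gs : List (Int × Int)) (need rem p1 p2 fk fnk : Int),
    (gs.map Prod.fst).Nodup →
    pvCount gs need rem p1 p2 fk fnk =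
      ((Mlist gs need).map (fun c =>
        if PySem.Int.mod (rem - 2 * c.sum) 11 = 0 then
          PySem.Int.floordiv fk (p1 * fprod c) * PySem.Int.floordiv fnk (p2 * fprodR gs c)
        else 0)).sum := by
  intro gs
  induction gs with
  | nil =>
    intro need rem p1 p2 fk fnk _
    by_cases hn : need = 0
    · subst hn
      simp [pvCount, Mlist, fprod_nil, fprodR_nil]
    · simp [pvCount, Mlist, hn]
  | cons p gs ih =>
    obtain ⟨v, cnt⟩ := p
    intro need rem p1 p2 fk fnk hnd
    have hv : v ∉ gs.map Prod.fst := by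
      simp only [List.map_cons, List.nodup_cons] at hnd
      exact hnd.1
    have hnd' : (gs.map Prod.fst).Nodup := by
      simp only [List.map_cons, List.nodup_cons] at hnd
      exact hnd.2
    show (PySem.List.pyRange 0 (min cnt need + 1)).foldl _ 0 = _
    rw [PySem.List.foldl_add]
    simp only [Mlist, List.map_flatMap, sum_flatMap, List.map_map, zero_add]
    apply congrArg List.sum
    apply List.map_congr_left
    intro j hj
    have hj0 : 0 ≤ j := (PySem.List.mem_pyRange_one.1 hj).1
    rw [ih (need - j) (rem - 2 * j * v) (p1 * pvFact j) (p2 * pvFact (cnt - j)) fk fnk hnd']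
    apply congrArg List.sum
    apply List.map_congr_left
    intro t ht
    have hvt : v ∉ t := fun hm => hv (mem_Mlist_keys gs (need - j) t ht v hm)
    have hsum : (List.replicate j.toNat v ++ t).sum = j * v + t.sum := by
      rw [List.sum_append, List.sum_replicate, nsmul_eq_mul, Int.toNat_of_nonneg hj0]
    have hfp : fprod (List.replicate j.toNat v ++ t) = pvFact j * fprod t := by
      rw [fprod_replicate_append v j.toNat t hvt, pvFact_natCast_toNat j hj0]
    have hcv : (List.count v (List.replicate j.toNat v ++ t) : Int) = j := by
      rw [List.count_append, List.count_replicate, List.count_eq_zero_of_not_mem hvt]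
      simp [Int.toNat_of_nonneg hj0]
    have hfr : fprodR ((v, cnt) :: gs) (List.replicate j.toNat v ++ t)
        = pvFact (cnt - j) * fprodR gs t := by
      unfold fprodR
      simp only [List.map_cons, List.prod_cons]
      congr 1
      · rw [hcv]
      · apply congrArg List.prod
        apply List.map_congr_left
        intro q hq
        have hqv : q.1 ≠ v := fun h => hv (h ▸ List.mem_map_of_mem hq)
        rw [List.count_append, List.count_replicate, if_neg (by simpa using hqv.symm)]
        simp
    simp only [Function.comp]
    rw [hsum, hfp, hfr]
    have harg : rem - 2 * (j * v + t.sum) = rem - 2 * j * v - 2 * t.sum := by ring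
    rw [harg]
    simp [mul_assoc]

lemma sorted_min_split : ∀ (c : List Int) (v : Int), c.Pairwise (· ≤ ·) → (∀ x ∈ c, v ≤ x) →
    c = List.replicate (c.count v) v ++ c.filter (fun x => x ≠ v) := by
  intro c
  induction c with
  | nil => simp
  | cons x c ih =>
    intro v hpw hmin
    by_cases hx : x = v
    · subst hx
      have htail : c = List.replicate (c.count x) x ++ c.filter (fun y => y ≠ x) :=
        ih x hpw.of_cons (fun y hy => List.rel_of_pairwise_cons hpw hy)
      have hcnt : List.count x (x :: c) = List.count x c + 1 := by simp
      rw [hcnt, List.replicate_succ, List.filter_cons]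
      simp only [ne_eq, not_true_eq_false, decide_false, Bool.false_eq_true, if_false]
      rw [List.cons_append]
      exact congrArg (x :: ·) htail
    · have hvx : v < x := lt_of_le_of_ne (hmin x List.mem_cons_self) (fun h => hx h.symm)
      have hgt : ∀ y ∈ (x :: c), v < y := by
        intro y hy
        rcases List.mem_cons.1 hy with rfl | hy
        · exact hvx
        · exact lt_of_lt_of_le hvx (List.rel_of_pairwise_cons hpw hy)
      have hcnt : List.count v (x :: c) = 0 :=
        List.count_eq_zero.2 (fun hm => lt_irrefl v (hgt v hm))
      have hfil : List.filter (fun y => y ≠ v) (x :: c) = x :: c :=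
        List.filter_eq_self.2 (fun y hy => by simpa using (ne_of_gt (hgt y hy)))
      rw [hcnt, hfil]
      simp

lemma mem_Mlist (gs : List (Int × Int)) (hk : gs.Pairwise (fun p q => p.1 < q.1)) :
    ∀ (need : Int) (c : List Int), 0 ≤ need →
      (c ∈ Mlist gs need ↔
        ((c.length : Int) = need ∧ c.Pairwise (· ≤ ·) ∧
          (∀ x ∈ c, x ∈ gs.map Prod.fst) ∧ (∀ p ∈ gs, (c.count p.1 : Int) ≤ p.2))) := by
  induction gs with
  | nil =>
    intro need c hneed
    by_cases hn : need = 0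
    · subst hn
      constructor
      · intro h
        have hc : c = [] := by simpa [Mlist] using h
        subst hc; simp
      · rintro ⟨hl, _, hx, _⟩
        have hc : c = [] := List.eq_nil_iff_forall_not_mem.2 (fun a ha => by simpa using hx a ha)
        subst hc; simp [Mlist]
    · constructor
      · intro h
        exact absurd h (by simp [Mlist, hn])
      · rintro ⟨hl, _, hx, _⟩
        have hc : c = [] := List.eq_nil_iff_forall_not_mem.2 (fun a ha => by simpa using hx a ha)
        rw [hc] at hl
        exact absurd (by simpa using hl.symm) hn
  | cons p gs ih =>
    obtain ⟨v, cnt⟩ := p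
    have hlt : ∀ q ∈ gs, v < q.1 := (List.pairwise_cons.1 hk).1
    have hk' : gs.Pairwise (fun p q => p.1 < q.1) := (List.pairwise_cons.1 hk).2
    intro need c hneed
    constructor
    · intro hc
      simp only [Mlist, List.mem_flatMap, List.mem_map] at hc
      obtain ⟨j, hj, t, ht, rfl⟩ := hc
      obtain ⟨hj0, hjlt⟩ := PySem.List.mem_pyRange_one.1 hj
      have hjle : j ≤ min cnt need := by omega
      have hneed' : 0 ≤ need - j := by
        have := le_trans hjle (min_le_right cnt need); omega
      obtain ⟨hlen, hpw, hkeys, hcnt⟩ := (ih hk' (need - j) t hneed').1 ht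
      have hvt : v ∉ t := by
        intro hm
        obtain ⟨q, hq, hqe⟩ := List.mem_map.1 (hkeys v hm)
        exact lt_irrefl v (hqe ▸ hlt q hq)
      refine ⟨?_, ?_, ?_, ?_⟩
      · have : (List.replicate j.toNat v ++ t).length = j.toNat + t.length := by simp
        rw [this]
        push_cast
        rw [Int.toNat_of_nonneg hj0]
        omega
      · rw [List.pairwise_append]
        refine ⟨List.pairwise_replicate.2 (Or.inr le_rfl), hpw, ?_⟩
        intro a ha b hb
        rw [List.eq_of_mem_replicate ha]
        obtain ⟨q, hq, rfl⟩ := List.mem_map.1 (hkeys b hb)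
        exact le_of_lt (hlt q hq)
      · intro x hx
        rcases List.mem_append.1 hx with hx | hx
        · rw [List.eq_of_mem_replicate hx]; simp
        · simp only [List.map_cons]
          exact List.mem_cons_of_mem _ (hkeys x hx)
      · intro q hq
        rcases List.mem_cons.1 hq with rfl | hq
        · have : List.count v (List.replicate j.toNat v ++ t) = j.toNat := by
            rw [List.count_append, List.count_replicate, List.count_eq_zero_of_not_mem hvt]
            simp
          rw [this, Int.toNat_of_nonneg hj0]
          exact le_trans hjle (min_le_left cnt need)
        · have hqv : q.1 ≠ v := fun h => lt_irrefl v (h ▸ hlt q hq)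
          have : List.count q.1 (List.replicate j.toNat v ++ t) = List.count q.1 t := by
            rw [List.count_append, List.count_replicate, if_neg (by simpa using hqv.symm)]
            simp
          rw [this]
          exact hcnt q hq
    · rintro ⟨hlen, hpw, hkeys, hcnt⟩
      have hmin : ∀ x ∈ c, v ≤ x := by
        intro x hx
        have hx' : x ∈ v :: List.map Prod.fst gs := by simpa using hkeys x hx
        rcases List.mem_cons.1 hx' with h | h
        · exact le_of_eq h.symm
        · obtain ⟨q, hq, hqe⟩ := List.mem_map.1 h
          exact le_of_lt (hqe ▸ hlt q hq)
      have hsplit := sorted_min_split c v hpw hmin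
      set t := c.filter (fun x => x ≠ v) with hts
      have hjcnt : (c.count v : Int) ≤ cnt := hcnt (v, cnt) List.mem_cons_self
      have hjlen : c.count v ≤ c.length := List.count_le_length
      have hlent : c.length = c.count v + t.length := by
        conv_lhs => rw [hsplit]
        simp
      have htm : t ∈ Mlist gs (need - (c.count v : Int)) := by
        refine (ih hk' (need - (c.count v : Int)) t (by omega)).2 ⟨?_, ?_, ?_, ?_⟩
        · omega
        · exact hpw.sublist List.filter_sublist
        · intro x hx
          have hxc := List.mem_filter.1 hx
          have hxv : x ≠ v := by simpa using hxc.2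
          have hx' : x ∈ v :: List.map Prod.fst gs := by simpa using hkeys x hxc.1
          rcases List.mem_cons.1 hx' with h | h
          · exact absurd h hxv
          · exact h
        · intro q hq
          exact le_trans (by exact_mod_cast List.Sublist.count_le q.1 List.filter_sublist) (hcnt q (List.mem_cons_of_mem _ hq))
      simp only [Mlist, List.mem_flatMap, List.mem_map]
      refine ⟨(c.count v : Int), ?_, t, htm, ?_⟩
      · rw [PySem.List.mem_pyRange_one]
        constructor
        · positivity
        · have : (c.count v : Int) ≤ need := by omega
          omega
      · rw [Int.toNat_natCast]
        exact hsplit.symm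

lemma nodup_Mlist (gs : List (Int × Int)) (hk : gs.Pairwise (fun p q => p.1 < q.1)) :
    ∀ (need : Int), (Mlist gs need).Nodup := by
  induction gs with
  | nil =>
    intro need
    by_cases hn : need = 0 <;> simp [Mlist, hn]
  | cons p gs ih =>
    obtain ⟨v, cnt⟩ := p
    have hlt : ∀ q ∈ gs, v < q.1 := (List.pairwise_cons.1 hk).1
    have hk' : gs.Pairwise (fun p q => p.1 < q.1) := (List.pairwise_cons.1 hk).2
    intro need
    have hcount : ∀ (j : Int), 0 ≤ j → ∀ x ∈ (Mlist gs (need - j)).map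
        (fun t => List.replicate j.toNat v ++ t), List.count v x = j.toNat := by
      intro j hj0 x hx
      obtain ⟨t, ht, rfl⟩ := List.mem_map.1 hx
      have hvt : v ∉ t := by
        intro hm
        obtain ⟨q, hq, hqe⟩ := List.mem_map.1 (mem_Mlist_keys gs (need - j) t ht v hm)
        exact lt_irrefl v (hqe ▸ hlt q hq)
      rw [List.count_append, List.count_replicate, List.count_eq_zero_of_not_mem hvt]
      simp
    show (List.flatMap _ _).Nodup
    rw [List.nodup_flatMap]
    constructor
    · intro j hj
      exact (ih hk' (need - j)).map (List.append_right_injective _)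
    · apply List.Pairwise.imp_of_mem ?_ (PySem.List.pairwise_lt_pyRange_one 0 (min cnt need + 1))
      intro j1 j2 hj1 hj2 hlt12
      intro x hx1 hx2
      have h1 := hcount j1 (PySem.List.mem_pyRange_one.1 hj1).1 x hx1
      have h2 := hcount j2 (PySem.List.mem_pyRange_one.1 hj2).1 x hx2
      have hj10 : 0 ≤ j1 := (PySem.List.mem_pyRange_one.1 hj1).1
      omega

-- the groups list of B: a permutation of Counter(ns).items() sorted strictly by value
lemma groups_perm (ns : List Int) :
    (PySem.List.sorted2 (PySem.Dict.counter ns).items Prod.fst Prod.snd).Perm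
      (PySem.Dict.counter ns).items :=
  PySem.List.sorted2_perm _ _ _ _

lemma insertBy_congr {α : Type} (f g : α → α → Bool) (x : α) :
    ∀ (acc : List α), (∀ a ∈ acc, f x a = g x a) →
      PySem.List.insertBy f x acc = PySem.List.insertBy g x acc := by
  intro acc
  induction acc with
  | nil => intro _; rfl
  | cons y ys ih =>
    intro h
    simp only [PySem.List.insertBy]
    rw [h y List.mem_cons_self]
    by_cases hg : g x y
    · simp [hg]
    · simp only [hg, Bool.false_eq_true, if_false]
      exact congrArg (y :: ·) (ih (fun a ha => h a (List.mem_cons_of_mem _ ha)))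

lemma foldl_insertBy_congr {α : Type} (f g : α → α → Bool) :
    ∀ (xs acc : List α),
      (∀ x ∈ xs, ∀ a, (a ∈ acc ∨ a ∈ xs) → f x a = g x a) →
      xs.foldl (fun acc x => PySem.List.insertBy f x acc) acc
        = xs.foldl (fun acc x => PySem.List.insertBy g x acc) acc := by
  intro xs
  induction xs with
  | nil => intro acc _; rfl
  | cons x xs ih =>
    intro acc h
    simp only [List.foldl_cons]
    rw [insertBy_congr f g x acc (fun a ha => h x List.mem_cons_self a (Or.inl ha))]
    apply ih
    intro y hy a ha
    rcases ha with ha | ha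
    · rcases (PySem.List.mem_insertBy g x a acc).1 ha with rfl | ha
      · exact h y (List.mem_cons_of_mem _ hy) a (Or.inr List.mem_cons_self)
      · exact h y (List.mem_cons_of_mem _ hy) a (Or.inl ha)
    · exact h y (List.mem_cons_of_mem _ hy) a (Or.inr (List.mem_cons_of_mem _ ha))

lemma sorted2_eq_sorted_fst (xs : List (Int × Int)) (h : (xs.map Prod.fst).Nodup) :
    PySem.List.sorted2 xs Prod.fst Prod.snd = PySem.List.sorted xs (fun p => p.1) := by
  have h1 : PySem.List.sorted2 xs Prod.fst Prod.snd
      = xs.foldl (fun acc x => PySem.List.insertBy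
          (fun a b => decide (a.1 < b.1) || (!decide (b.1 < a.1) && decide (a.2 < b.2))) x acc)
          [] := rfl
  rw [h1, PySem.List.sorted_eq_foldl_insertBy]
  apply foldl_insertBy_congr
  intro x hx a ha
  have ha' : a ∈ xs := by
    rcases ha with ha | ha
    · exact absurd ha (List.not_mem_nil)
    · exact ha
  rcases lt_trichotomy x.1 a.1 with hlt | heq | hgt
  · simp [hlt]
  · have hxa : x = a := List.inj_on_of_nodup_map h hx ha' heq
    subst hxa
    simp [lt_irrefl]
  · simp [hgt, asymm hgt, not_lt_of_gt hgt]

lemma pairwise_lt_of_le_nodup : ∀ (l : List (Int × Int)),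
    l.Pairwise (fun p q => p.1 ≤ q.1) → (l.map Prod.fst).Nodup →
      l.Pairwise (fun p q => p.1 < q.1) := by
  intro l
  induction l with
  | nil => intro _ _; exact List.Pairwise.nil
  | cons x l ih =>
    intro h1 h2
    simp only [List.map_cons, List.nodup_cons] at h2
    refine List.pairwise_cons.2 ⟨?_, ih (List.pairwise_cons.1 h1).2 h2.2⟩
    intro q hq
    have hle := (List.pairwise_cons.1 h1).1 q hq
    have hne : x.1 ≠ q.1 := fun he => h2.1 (by rw [he]; exact List.mem_map_of_mem hq)
    exact lt_of_le_of_ne hle hne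

lemma items_fst_nodup (ns : List Int) : ((PySem.Dict.counter ns).items.map Prod.fst).Nodup := by
  have := PySem.Dict.nodup_keys_counter ns
  simpa [PySem.Dict.keys] using this

lemma groups_fst_nodup (ns : List Int) :
    ((PySem.List.sorted2 (PySem.Dict.counter ns).items Prod.fst Prod.snd).map Prod.fst).Nodup :=
  (((groups_perm ns).map Prod.fst).nodup_iff).2 (items_fst_nodup ns)

lemma groups_pairwise (ns : List Int) :
    (PySem.List.sorted2 (PySem.Dict.counter ns).items Prod.fst Prod.snd).Pairwise
      (fun p q => p.1 < q.1) := by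
  rw [sorted2_eq_sorted_fst _ (items_fst_nodup ns)]
  apply pairwise_lt_of_le_nodup
  · exact PySem.List.sorted_pairwise _ _
  · have hperm : (PySem.List.sorted (PySem.Dict.counter ns).items (fun p => p.1)).Perm
        (PySem.Dict.counter ns).items := PySem.List.sorted_perm _ _ false
    exact ((hperm.map Prod.fst).nodup_iff).2 (items_fst_nodup ns)

lemma chain_div : ∀ (l : List Int) (a : Int), (∀ d ∈ l, 0 < d) →
    l.foldl PySem.Int.floordiv a = PySem.Int.floordiv a l.prod := by
  intro l
  induction l with
  | nil =>
    intro a _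
    show a = PySem.Int.floordiv a 1
    rw [PySem.Int.floordiv_eq_ediv_of_pos one_pos, Int.ediv_one]
  | cons d l ih =>
    intro a h
    have hd : 0 < d := h d List.mem_cons_self
    have hl : ∀ e ∈ l, 0 < e := fun e he => h e (List.mem_cons_of_mem _ he)
    have hp : 0 < l.prod := List.prod_pos hl
    rw [List.foldl_cons, ih _ hl, List.prod_cons]
    rw [PySem.Int.floordiv_eq_ediv_of_pos hd, PySem.Int.floordiv_eq_ediv_of_pos hp,
      PySem.Int.floordiv_eq_ediv_of_pos (mul_pos hd hp)]
    exact Int.ediv_ediv_eq_ediv_mul (le_of_lt hd)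

lemma curA_eq (ns c : List Int) :
    curA ns c = PySem.Int.floordiv (pvFact ((ns.length / 2 : Nat) : Int)) (fprod c) := by
  unfold curA
  rw [← List.foldl_map (f := fun kv : Int × Int => pvFact kv.2) (g := PySem.Int.floordiv)
      (l := (PySem.Dict.counter c).items) (init := pvFact ((ns.length / 2 : Nat) : Int))]
  rw [chain_div _ _ (fun d hd => by
    obtain ⟨kv, _, rfl⟩ := List.mem_map.1 hd
    exact pvFact_pos _)]
  congr 1
  rw [PySem.Dict.items_counter, List.map_map]
  unfold fprod
  rw [PySem.List.dedup_eq_ofList]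
  rfl

-- CPython's Counter.__sub__ loop body, named so the fold can be reasoned about
def subStep (b : PySem.Dict Int Int) (r : PySem.Dict Int Int) (p : Int × Int) : PySem.Dict Int Int :=
  let newcount := p.2 - b.getD p.1 0
  if 0 < newcount then r.insert p.1 newcount else r

lemma subStep_eq (b r : PySem.Dict Int Int) (p : Int × Int) :
    subStep b r p = if 0 < p.2 - b.getD p.1 0 then r.insert p.1 (p.2 - b.getD p.1 0) else r := rfl

lemma foldl_sub_items (b : PySem.Dict Int Int) :
    ∀ (l : List (Int × Int)) (d : PySem.Dict Int Int),
      (l.map Prod.fst).Nodup → (∀ p ∈ l, d.contains p.1 = false) →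
      (l.foldl (subStep b) d).items
        = d.items ++ l.filterMap (fun p =>
            if 0 < p.2 - b.getD p.1 0 then some (p.1, p.2 - b.getD p.1 0) else none) := by
  intro l
  induction l with
  | nil => intro d _ _; simp
  | cons p l ih =>
    intro d hnd hfree
    have hnd' : (l.map Prod.fst).Nodup := by
      simp only [List.map_cons, List.nodup_cons] at hnd; exact hnd.2
    have hp1 : p.1 ∉ l.map Prod.fst := by
      simp only [List.map_cons, List.nodup_cons] at hnd; exact hnd.1
    simp only [List.foldl_cons, subStep_eq]
    by_cases hpos : 0 < p.2 - b.getD p.1 0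
    · have hfree' : ∀ q ∈ l, (d.insert p.1 (p.2 - b.getD p.1 0)).contains q.1 = false := by
        intro q hq
        rw [PySem.Dict.contains_insert]
        have hq1 : q.1 ≠ p.1 := fun he => hp1 (by rw [← he]; exact List.mem_map_of_mem hq)
        simp [hfree q (List.mem_cons_of_mem _ hq), hq1]
      rw [if_pos hpos]
      rw [ih (d.insert p.1 (p.2 - b.getD p.1 0)) hnd' hfree']
      rw [PySem.Dict.items_insert, if_neg (by simp [hfree p List.mem_cons_self])]
      rw [List.filterMap_cons, if_pos hpos]
      simp [List.append_assoc]
    · rw [if_neg hpos, ih d hnd' (fun q hq => hfree q (List.mem_cons_of_mem _ hq))]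
      rw [List.filterMap_cons, if_neg hpos]

lemma prod_filterMap (b : PySem.Dict Int Int) :
    ∀ (l : List (Int × Int)), (∀ p ∈ l, 0 ≤ p.2 - b.getD p.1 0) →
      ((l.filterMap (fun p => if 0 < p.2 - b.getD p.1 0
          then some (p.1, p.2 - b.getD p.1 0) else none)).map (fun kv => pvFact kv.2)).prod
        = (l.map (fun p => pvFact (p.2 - b.getD p.1 0))).prod := by
  intro l
  induction l with
  | nil => intro _; simp
  | cons p l ih =>
    intro h
    have ht := ih (fun q hq => h q (List.mem_cons_of_mem _ hq))
    by_cases hpos : 0 < p.2 - b.getD p.1 0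
    · rw [List.filterMap_cons, if_pos hpos]
      simp only [List.map_cons, List.prod_cons]
      rw [ht]
    · have h0 : p.2 - b.getD p.1 0 = 0 := le_antisymm (not_lt.1 hpos) (h p List.mem_cons_self)
      rw [List.filterMap_cons, if_neg hpos, ht]
      simp only [List.map_cons, List.prod_cons, h0]
      have : pvFact 0 = 1 := rfl
      rw [this, one_mul]

lemma cur2A_eq (ns c : List Int) (hcnt : ∀ x, c.count x ≤ ns.count x) :
    cur2A ns c = PySem.Int.floordiv (pvFact ((ns.length - ns.length / 2 : Nat) : Int))
      (fprodR (PySem.List.sorted2 (PySem.Dict.counter ns).items Prod.fst Prod.snd) c) := by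
  unfold cur2A
  have hrw : pvCounterSub (PySem.Dict.counter ns) (PySem.Dict.counter c)
      = (PySem.Dict.counter ns).items.foldl (subStep (PySem.Dict.counter c)) PySem.Dict.empty := rfl
  rw [hrw]
  have hfree : ∀ p ∈ (PySem.Dict.counter ns).items,
      (PySem.Dict.empty : PySem.Dict Int Int).contains p.1 = false := by
    intro p _; rfl
  rw [foldl_sub_items (PySem.Dict.counter c) (PySem.Dict.counter ns).items PySem.Dict.empty
    (items_fst_nodup ns) hfree]
  have hemp : (PySem.Dict.empty : PySem.Dict Int Int).items = [] := rfl
  rw [hemp, List.nil_append]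
  rw [← List.foldl_map (f := fun kv : Int × Int => pvFact kv.2) (g := PySem.Int.floordiv)]
  rw [chain_div _ _ (fun d hd => by
    obtain ⟨kv, _, rfl⟩ := List.mem_map.1 hd
    exact pvFact_pos _)]
  congr 1
  have hnn : ∀ p ∈ (PySem.Dict.counter ns).items,
      0 ≤ p.2 - (PySem.Dict.counter c).getD p.1 0 := by
    intro p hp
    rw [PySem.Dict.items_counter] at hp
    obtain ⟨x, _, rfl⟩ := List.mem_map.1 hp
    rw [PySem.Dict.getD_counter]
    show (0 : Int) ≤ (List.count x ns : Int) - (List.count x c : Int)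
    have h := hcnt x
    omega
  rw [prod_filterMap (PySem.Dict.counter c) _ hnn]
  unfold fprodR
  rw [List.Perm.prod_eq ((groups_perm ns).map
    (fun p : Int × Int => pvFact (p.2 - (c.count p.1 : Int))))]
  apply congrArg List.prod
  apply List.map_congr_left
  intro p hp
  rw [PySem.Dict.getD_counter]

-- per-element equality of the two leaf terms
lemma gA_eq_hB (ns c : List Int) (hsub : c.Subperm ns) :
    gA ns c = hB ns.sum (pvFact ((ns.length / 2 : Nat) : Int))
      (pvFact ((ns.length - ns.length / 2 : Nat) : Int))
      (PySem.List.sorted2 (PySem.Dict.counter ns).items Prod.fst Prod.snd) c := by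
  have hcnt : ∀ x, c.count x ≤ ns.count x := by
    intro x
    by_cases hx : x ∈ c
    · exact List.subperm_ext_iff.1 hsub x hx
    · simp [List.count_eq_zero_of_not_mem hx]
  unfold gA hB
  have harg : ns.sum - c.sum * 2 = ns.sum - 2 * c.sum := by ring
  rw [harg, curA_eq, cur2A_eq ns c hcnt]

-- the two index sets coincide
lemma set_eq (ns : List Int) :
    ((pvCombos ns (ns.length / 2)).map sortc).toFinset
      = (Mlist (PySem.List.sorted2 (PySem.Dict.counter ns).items Prod.fst Prod.snd)
          ((ns.length / 2 : Nat) : Int)).toFinset := by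
  have hgp := groups_pairwise ns
  ext c
  simp only [List.mem_toFinset]
  rw [mem_A_set, mem_Mlist _ hgp _ c (Int.natCast_nonneg _)]
  constructor
  · rintro ⟨hsub, hlen, hsort⟩
    have hcnt : ∀ x, c.count x ≤ ns.count x := by
      intro x
      by_cases hx : x ∈ c
      · exact List.subperm_ext_iff.1 hsub x hx
      · simp [List.count_eq_zero_of_not_mem hx]
    refine ⟨by exact_mod_cast hlen, ?_, ?_, ?_⟩
    · have hp := PySem.List.sorted_pairwise c (fun x => x)
      rw [show PySem.List.sorted c (fun x => x) = sortc c from rfl, hsort] at hp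
      exact hp
    · intro x hx
      have hxns : x ∈ ns := by
        have h1 : 0 < c.count x := List.count_pos_iff.2 hx
        have h2 := hcnt x
        exact List.count_pos_iff.1 (by omega)
      have hkeys : x ∈ (PySem.Dict.counter ns).items.map Prod.fst := by
        rw [PySem.Dict.items_counter, List.map_map]
        simpa using (PySem.Set.mem_ofList ns x).2 hxns
      exact ((groups_perm ns).map Prod.fst).mem_iff.2 hkeys
    · intro p hp
      have hpi : p ∈ (PySem.Dict.counter ns).items := ((groups_perm ns).mem_iff).1 hp
      rw [PySem.Dict.items_counter] at hpi
      obtain ⟨x, _, rfl⟩ := List.mem_map.1 hpi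
      show ((List.count x c : Nat) : Int) ≤ (List.count x ns : Int)
      exact_mod_cast hcnt x
  · rintro ⟨hlen, hpw, hkeys, hcnt⟩
    refine ⟨?_, by exact_mod_cast hlen, ?_⟩
    · rw [List.subperm_ext_iff]
      intro x hx
      obtain ⟨p, hp, hpe⟩ := List.mem_map.1 (hkeys x hx)
      have hbound := hcnt p hp
      have hpi : p ∈ (PySem.Dict.counter ns).items := ((groups_perm ns).mem_iff).1 hp
      rw [PySem.Dict.items_counter] at hpi
      obtain ⟨y, _, hye⟩ := List.mem_map.1 hpi
      have hy1 : y = x := by rw [← hpe, ← hye]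
      subst hy1
      rw [← hye] at hbound
      have hbound' : ((List.count y c : Nat) : Int) ≤ ((List.count y ns : Nat) : Int) := hbound
      exact_mod_cast hbound'
    · exact PySem.List.sorted_eq_self_of_pairwise c (fun x => x) (by simpa using hpw)

-- ===== VERDICT (by name: the statement is the Claim_ definition above) =====
theorem div11_spec : Claim_equal_div11 := by
  intro ns _
  unfold Spec_div11
  rw [div11_eq_sum]
  have hgp := groups_pairwise ns
  have halt : div11_alt ns
      = ((Mlist (PySem.List.sorted2 (PySem.Dict.counter ns).items Prod.fst Prod.snd)
          ((ns.length / 2 : Nat) : Int)).map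
          (hB ns.sum (pvFact ((ns.length / 2 : Nat) : Int))
            (pvFact ((ns.length - ns.length / 2 : Nat) : Int))
            (PySem.List.sorted2 (PySem.Dict.counter ns).items Prod.fst Prod.snd))).sum := by
    show pvCount _ _ _ _ _ _ _ = _
    rw [countB _ _ _ _ _ _ _ (groups_fst_nodup ns)]
    apply congrArg List.sum
    apply List.map_congr_left
    intro t _
    simp [hB, one_mul]
  rw [halt]
  rw [← List.sum_toFinset _ (nodup_Mlist _ hgp _)]
  rw [← set_eq ns]
  apply Finset.sum_congr rfl
  intro c hc
  have hsub : c.Subperm ns :=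
    ((mem_A_set ns c (ns.length / 2)).1 (List.mem_toFinset.1 hc)).1
  exact gA_eq_hB ns c hsub
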